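-- pv_equiv track=rewrite | github.com/kidsneuro-lab/leafcutter2 | scripts/add_on_scripts/Reformat_gtf.py | count_bars_until_n_position
-- ===== SOURCE A (Python) =====
-- def count_bars_until_n_position(sequence, n):
--     bar_count = 0
--     non_bar_count = 0
--     for i,char in enumerate(sequence):
--         if non_bar_count == n:
--             break
--         if char == "|":
--             bar_count += 1
--         else:
--             non_bar_count += 1
--     return bar_count
-- ===== SOURCE B (Python) =====
-- def count_bars_until_n_position(sequence, n):
--     if n == 0:
--         return 0
--     positions = [i for i, ch in enumerate(sequence) if ch != "|"]
--     if 0 < n <= len(positions):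
--         return sequence[:positions[n - 1]].count("|")
--     return sequence.count("|")
-- ===== Notes on version B (the rewrite author's own statement) =====
-- stated objective: alternative
-- what changed: Replaces A's fused dual-counter break loop with a locate-then-count decomposition: build the list of non-bar positions, then count bars in the prefix before the nth non-bar position (or in the whole string if n exceeds the non-bar count or is negative).
import Mathlib
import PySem

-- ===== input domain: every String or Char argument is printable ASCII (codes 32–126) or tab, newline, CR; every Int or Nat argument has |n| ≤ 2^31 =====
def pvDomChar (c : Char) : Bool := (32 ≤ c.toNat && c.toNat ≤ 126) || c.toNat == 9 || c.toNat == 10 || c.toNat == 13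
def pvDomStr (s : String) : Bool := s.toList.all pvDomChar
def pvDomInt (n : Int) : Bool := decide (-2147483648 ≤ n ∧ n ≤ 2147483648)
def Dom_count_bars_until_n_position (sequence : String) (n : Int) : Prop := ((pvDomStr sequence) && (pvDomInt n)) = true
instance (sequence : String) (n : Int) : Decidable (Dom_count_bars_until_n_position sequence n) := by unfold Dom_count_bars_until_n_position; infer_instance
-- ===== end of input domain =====

-- B replaces A's fused dual-counter break loop with a locate-then-count decomposition
-- (non-bar positions list, then a prefix bar count); alternative structure, same cost.

-- ===== PORT A =====
-- the for-loop with break: state (bar_count, non_bar_count), early return at the break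
def pvGoA (n : Int) : List Char → Int → Int → Int
  | [], bar, _ => bar
  | c :: rest, bar, nonbar =>
    if nonbar = n then bar
    else if c = '|' then pvGoA n rest (bar + 1) nonbar
    else pvGoA n rest bar (nonbar + 1)

def count_bars_until_n_position (sequence : String) (n : Int) : Int :=
  pvGoA n sequence.toList 0 0

-- ===== PORT B =====
def count_bars_until_n_position_alt (sequence : String) (n : Int) : Int :=
  if n = 0 then 0
  else
    -- positions = [i for i, ch in enumerate(sequence) if ch != "|"]
    let positions := ((PySem.List.enumerate sequence.toList).filter (fun p => p.2 ≠ '|')).map (·.1)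
    if 0 < n ∧ n ≤ positions.length then
      -- sequence[:positions[n-1]].count("|"); the index is in range by the guard
      ((PySem.List.slice sequence.toList none (some (positions.getD (n - 1).toNat 0))).count '|' : Int)
    else
      -- sequence.count("|") (single-char needle: occurrence count = char count)
      (sequence.toList.count '|' : Int)

-- ===== PRECONDITION & SPEC =====
def Spec_count_bars_until_n_position (sequence : String) (n : Int) (out : Int) : Prop := out = count_bars_until_n_position_alt sequence n
instance (sequence : String) (n : Int) (out : Int) : Decidable (Spec_count_bars_until_n_position sequence n out) := by unfold Spec_count_bars_until_n_position; infer_instance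

-- ===== CLAIM (what is proved, stated in full; the proofs are below) =====
def Claim_equal_count_bars_until_n_position : Prop := ∀ (sequence : String) (n : Int), Dom_count_bars_until_n_position sequence n → Spec_count_bars_until_n_position sequence n (count_bars_until_n_position sequence n)

-- ===== LEMMAS AND PROOFS =====

-- the non-bar positions of cs when enumeration starts at s
def pvPos (cs : List Char) (s : Int) : List Int :=
  ((PySem.List.enumerate cs s).filter (fun p => p.2 ≠ '|')).map (·.1)

lemma pvPos_nil (s : Int) : pvPos [] s = [] := rfl

lemma pvPos_cons (c : Char) (cs : List Char) (s : Int) :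
    pvPos (c :: cs) s = (if c = '|' then [] else [s]) ++ pvPos cs (s + 1) := by
  simp [pvPos, PySem.List.enumerate_cons, List.filter_cons]
  by_cases h : c = '|' <;> simp [h]

lemma pvPos_shift (cs : List Char) : ∀ s : Int, pvPos cs (s + 1) = (pvPos cs s).map (· + 1) := by
  induction cs with
  | nil => intro s; simp [pvPos_nil]
  | cons c cs ih =>
    intro s
    rw [pvPos_cons, pvPos_cons, ih (s + 1)]
    by_cases h : c = '|' <;> simp [h]

lemma pvPos_nonneg (cs : List Char) : ∀ s x, x ∈ pvPos cs s → s ≤ x := by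
  induction cs with
  | nil => intro s x hx; simp [pvPos_nil] at hx
  | cons c cs ih =>
    intro s x hx
    rw [pvPos_cons] at hx
    rcases List.mem_append.mp hx with h | h
    · by_cases hc : c = '|' <;> simp [hc] at h; omega
    · have := ih (s + 1) x h; omega

-- the residual loop of A once bar_count is factored out: m = n - non_bar_count
def pvF : List Char → Int → Int
  | [], _ => 0
  | c :: cs, m => if m = 0 then 0 else if c = '|' then 1 + pvF cs m else pvF cs (m - 1)

lemma pvGoA_eq (n : Int) (cs : List Char) :
    ∀ bar nonbar : Int, pvGoA n cs bar nonbar = bar + pvF cs (n - nonbar) := by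
  induction cs with
  | nil => intro bar nonbar; simp [pvGoA, pvF]
  | cons c cs ih =>
    intro bar nonbar
    by_cases h : nonbar = n
    · simp [pvGoA, pvF, h]
    · have hm : ¬ (n - nonbar = 0) := by omega
      by_cases hc : c = '|'
      · rw [show pvGoA n (c :: cs) bar nonbar = pvGoA n cs (bar + 1) nonbar by
          simp [pvGoA, h, hc], ih]
        simp [pvF, hm, hc]; ring
      · rw [show pvGoA n (c :: cs) bar nonbar = pvGoA n cs bar (nonbar + 1) by
          simp [pvGoA, h, hc], ih]
        have : n - (nonbar + 1) = n - nonbar - 1 := by ring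
        simp [pvF, hm, hc, this]

-- B's body on the character list
def pvAltCore (cs : List Char) (n : Int) : Int :=
  if n = 0 then 0
  else
    if 0 < n ∧ n ≤ (pvPos cs 0).length then
      ((PySem.List.slice cs none (some ((pvPos cs 0).getD (n - 1).toNat 0))).count '|' : Int)
    else
      (cs.count '|' : Int)

lemma alt_eq_core (sequence : String) (n : Int) :
    count_bars_until_n_position_alt sequence n = pvAltCore sequence.toList n := rfl

lemma getD_map_add_one (l : List Int) (k : Nat) (hk : k < l.length) :
    (l.map (· + 1)).getD k 0 = l.getD k 0 + 1 := by
  rw [List.getD_eq_getElem?_getD, List.getD_eq_getElem?_getD, List.getElem?_map,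
    List.getElem?_eq_getElem hk]
  simp

lemma getD_nonneg (l : List Int) (k : Nat) (h : ∀ x ∈ l, 0 ≤ x) : 0 ≤ l.getD k 0 := by
  rw [List.getD_eq_getElem?_getD]
  cases hg : l[k]? with
  | none => simp
  | some v => simpa using h v (List.mem_of_getElem? hg)

lemma core_zero (cs : List Char) : pvAltCore cs 0 = 0 := by simp [pvAltCore]

lemma core_in (cs : List Char) (n : Int) (h0 : n ≠ 0)
    (hr : 0 < n ∧ n ≤ (pvPos cs 0).length) :
    pvAltCore cs n = ((cs.take ((pvPos cs 0).getD (n - 1).toNat 0).toNat).count '|' : Int) := by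
  have hge : 0 ≤ (pvPos cs 0).getD (n - 1).toNat 0 :=
    getD_nonneg _ _ (fun x hx => pvPos_nonneg cs 0 x hx)
  rw [pvAltCore, if_neg h0, if_pos hr, PySem.List.slice_to cs hge]

lemma core_out (cs : List Char) (n : Int) (h0 : n ≠ 0)
    (hr : ¬ (0 < n ∧ n ≤ (pvPos cs 0).length)) :
    pvAltCore cs n = (cs.count '|' : Int) := by
  rw [pvAltCore, if_neg h0, if_neg hr]

lemma pvF_eq_core (cs : List Char) : ∀ n : Int, pvF cs n = pvAltCore cs n := by
  induction cs with
  | nil =>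
    intro n
    by_cases h : n = 0
    · simp [pvF, h, core_zero]
    · rw [show pvF [] n = 0 by simp [pvF], core_out [] n h (by simp only [pvPos_nil, List.length_nil]; omega)]
      simp
  | cons c cs ih =>
    intro n
    by_cases h0 : n = 0
    · simp [pvF, h0, core_zero]
    have hnn : ∀ x ∈ pvPos cs 0, (0 : Int) ≤ x := fun x hx => pvPos_nonneg cs 0 x hx
    by_cases hc : c = '|'
    · -- bar: positions shift by one, a bar is prepended to every prefix
      have hpos : pvPos (c :: cs) 0 = (pvPos cs 0).map (· + 1) := by
        rw [pvPos_cons, pvPos_shift]; simp [hc]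
      rw [show pvF (c :: cs) n = 1 + pvF cs n by simp [pvF, h0, hc], ih n]
      by_cases hr : 0 < n ∧ n ≤ (pvPos cs 0).length
      · have hr' : 0 < n ∧ n ≤ ((pvPos (c :: cs) 0).length : Int) := by
          rw [hpos, List.length_map]; exact hr
        have hk : (n - 1).toNat < (pvPos cs 0).length := by omega
        rw [core_in cs n h0 hr, core_in (c :: cs) n h0 hr', hpos,
          getD_map_add_one _ _ hk]
        have hge : 0 ≤ (pvPos cs 0).getD (n - 1).toNat 0 := getD_nonneg _ _ hnn
        have ht : ((pvPos cs 0).getD (n - 1).toNat 0 + 1).toNat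
            = ((pvPos cs 0).getD (n - 1).toNat 0).toNat + 1 := by omega
        rw [ht, List.take_succ_cons, List.count_cons]
        simp [hc]; ring
      · have hr' : ¬ (0 < n ∧ n ≤ ((pvPos (c :: cs) 0).length : Int)) := by
          rw [hpos, List.length_map]; exact hr
        rw [core_out cs n h0 hr, core_out (c :: cs) n h0 hr', List.count_cons]
        simp [hc]; ring
    · -- non-bar: position 0 is prepended
      have hpos : pvPos (c :: cs) 0 = 0 :: (pvPos cs 0).map (· + 1) := by
        rw [pvPos_cons, pvPos_shift]; simp [hc]
      have hlen : ((pvPos (c :: cs) 0).length : Int) = (pvPos cs 0).length + 1 := by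
        rw [hpos]; simp
      rw [show pvF (c :: cs) n = pvF cs (n - 1) by simp [pvF, h0, hc], ih (n - 1)]
      by_cases h1 : n = 1
      · -- first non-bar char is at index 0: both sides count an empty prefix
        subst h1
        rw [show (1 : Int) - 1 = 0 by norm_num, core_zero,
          core_in (c :: cs) 1 (by omega) (by omega)]
        rw [hpos]; simp
      by_cases hneg : n < 0
      · rw [core_out cs (n - 1) (by omega) (by omega),
          core_out (c :: cs) n h0 (by omega), List.count_cons]
        simp [hc]
      · have h2 : 2 ≤ n := by omega
        by_cases hr : n ≤ (pvPos cs 0).length + 1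
        · have hrc : 0 < n - 1 ∧ n - 1 ≤ ((pvPos cs 0).length : Int) := by omega
          have hr' : 0 < n ∧ n ≤ ((pvPos (c :: cs) 0).length : Int) := by omega
          rw [core_in cs (n - 1) (by omega) hrc, core_in (c :: cs) n h0 hr', hpos]
          have hk2 : (n - 1 - 1).toNat < (pvPos cs 0).length := by omega
          have hkd : (n - 1).toNat = (n - 1 - 1).toNat + 1 := by omega
          rw [hkd, List.getD_cons_succ, getD_map_add_one _ _ hk2]
          have hge : 0 ≤ (pvPos cs 0).getD (n - 1 - 1).toNat 0 := getD_nonneg _ _ hnn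
          have ht : ((pvPos cs 0).getD (n - 1 - 1).toNat 0 + 1).toNat
              = ((pvPos cs 0).getD (n - 1 - 1).toNat 0).toNat + 1 := by omega
          rw [ht, List.take_succ_cons, List.count_cons]
          simp [hc]
        · rw [core_out cs (n - 1) (by omega) (by omega),
            core_out (c :: cs) n h0 (by omega), List.count_cons]
          simp [hc]

-- ===== VERDICT (by name: the statement is the Claim_ definition above) =====
theorem count_bars_until_n_position_spec : Claim_equal_count_bars_until_n_position := by
  intro sequence n _
  show count_bars_until_n_position sequence n = count_bars_until_n_position_alt sequence n
  rw [count_bars_until_n_position, pvGoA_eq, alt_eq_core]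
  simpa using pvF_eq_core sequence.toList n
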